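-- pv_equiv track=rewrite | github.com/Delemangi/DnA | 11/ostrovi_vo_string.py | stringovi
-- ===== SOURCE A (Python) =====
-- import collections
--
-- def stringovi(S, K):
--     substrings = set()
--
--     for i in range(len(S)):
--         for j in range(i, len(S)):
--             substrings.add(S[i:j + 1])
--
--     islands = [count_islands(create_islands(S, substring, 'x' * len(substring))) for substring in substrings]
--     counter = collections.Counter(islands)
--
--     return counter[K]
--
-- def create_islands(string, substring, replace):
--     m = [c for c in string]
--     rep = [c for c in replace]
--
--     for i in range(len(string) - len(substring) + 1):
--         if string[i:i + len(substring)] == substring: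
--             m[i:i + len(substring)] = rep
--
--     return ''.join(m)
--
-- def count_islands(string):
--     counter = 0
--
--     for i in range(1, len(string)):
--         if string[i - 1] == 'x' and string[i] != 'x':
--             counter += 1
--
--     if string[-1] == 'x':
--         counter += 1
--
--     return counter
-- ===== SOURCE B (Python) =====
-- def stringovi(S, K):
--     """Task: for each distinct substring t of S, replace every occurrence of t
--     in S by 'x' characters and count the islands (maximal runs) of 'x' in the
--     resulting string; return how many distinct substrings yield exactly K islands.
--
--     Instead of rebuilding the string once per substring, index all occurrence
--     start positions of every distinct substring in a single nested pass, then
--     answer each substring from its start list with one linear scan.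
--     """
--     n = len(S)
--     occ = {}
--     for i in range(n):
--         for j in range(i, n):
--             occ.setdefault(S[i:j + 1], []).append(i)
--     ans = 0
--     for t, starts in occ.items():
--         L = len(t)
--         # which positions hold 'x' after the replacement: those that were
--         # already 'x', plus every position inside an occurrence of t
--         is_x = [c == 'x' for c in S]
--         for p in starts:
--             for q in range(p, p + L):
--                 is_x[q] = True
--         islands = 0
--         prev = False
--         for b in is_x:
--             if b and not prev:
--                 islands += 1
--             prev = b
--         if islands == K:
--             ans += 1
--     return ans
-- ===== Notes on version B (the rewrite author's own statement) =====
-- stated objective: faster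
-- what changed: Instead of rebuilding the whole string for every distinct substring via repeated slice-compare-and-splice and then rescanning it, B builds in one nested pass a dict mapping each distinct substring to its list of occurrence start positions, then derives each substring's island count from a boolean array of positions holding 'x' after the replacement (pre-existing 'x' characters plus occurrence-covered positions, per the task's replace-with-'x' statement) in a single scan.
import Mathlib
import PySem

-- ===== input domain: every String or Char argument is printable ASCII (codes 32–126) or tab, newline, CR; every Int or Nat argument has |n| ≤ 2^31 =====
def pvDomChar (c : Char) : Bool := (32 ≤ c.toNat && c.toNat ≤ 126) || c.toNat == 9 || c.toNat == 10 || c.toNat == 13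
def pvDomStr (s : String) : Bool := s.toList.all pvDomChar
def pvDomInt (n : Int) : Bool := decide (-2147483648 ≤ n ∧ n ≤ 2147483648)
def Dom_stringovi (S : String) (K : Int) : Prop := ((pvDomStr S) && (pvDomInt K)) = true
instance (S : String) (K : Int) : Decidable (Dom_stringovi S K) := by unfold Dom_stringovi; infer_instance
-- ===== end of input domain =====

-- B replaces A's per-substring rebuild-the-string scan by a one-pass occurrence index
-- (dict substring -> start positions) plus a per-substring 'x'-position array; return values proved equal.

-- ===== PORT A =====
-- splice assignment m[i:i+len(rep)] = rep; exact for 0 ≤ i and i + len(rep) ≤ len(m),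
-- which holds at every call site inside pvCreateIslands
def pvSplice (m : List Char) (i : Int) (rep : List Char) : List Char :=
  m.take i.toNat ++ rep ++ m.drop (i.toNat + rep.length)

def pvCreateIslands (s sub rep : List Char) : List Char :=
  (PySem.List.pyRange 0 ((s.length : Int) - (sub.length : Int) + 1) 1).foldl
    (fun m i =>
      if PySem.List.slice s (some i) (some (i + (sub.length : Int))) == sub then
        pvSplice m i rep
      else m)
    s

def pvCountIslands (s : List Char) : Int :=
  let c :=
    (PySem.List.pyRange 1 (s.length : Int) 1).foldl
      (fun c i =>
        if PySem.List.pyGetD s (i - 1) ' ' == 'x' && !(PySem.List.pyGetD s i ' ' == 'x') then c + 1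
        else c)
      0
  -- s[-1]: inside stringovi this is only evaluated on nonempty s (Python would raise on "");
  -- the default ' ' is never 'x', so the guard is exact there
  if PySem.List.pyGetD s (-1) ' ' == 'x' then c + 1 else c

def stringovi (S : String) (K : Int) : Int :=
  let cs := S.toList
  let n : Int := cs.length
  let substrings : PySem.Set (List Char) :=
    (PySem.List.pyRange 0 n 1).foldl
      (fun st i =>
        (PySem.List.pyRange i n 1).foldl
          (fun st j => PySem.Set.add st (PySem.List.slice cs (some i) (some (j + 1)))) st)
      PySem.Set.empty
  -- the comprehension iterates a Python set; the final Counter lookup is order-independent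
  let islands : List Int :=
    substrings.map (fun t => pvCountIslands (pvCreateIslands cs t (List.replicate t.length 'x')))
  let counter := PySem.Dict.counter islands
  counter.getD K 0

-- ===== PORT B =====
def pvMark (m : List Bool) (p L : Int) : List Bool :=
  (PySem.List.pyRange p (p + L) 1).foldl (fun m q => PySem.List.pySetD m q true) m

def pvCountRuns (m : List Bool) : Int :=
  (m.foldl (fun (st : Int × Bool) b => (if b && !st.2 then st.1 + 1 else st.1, b)) (0, false)).1

def stringovi_alt (S : String) (K : Int) : Int :=
  let cs := S.toList
  let n : Int := cs.length
  let occ : PySem.Dict (List Char) (List Int) :=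
    (PySem.List.pyRange 0 n 1).foldl
      (fun d i =>
        (PySem.List.pyRange i n 1).foldl
          (fun d j => d.modify (PySem.List.slice cs (some i) (some (j + 1))) [] (fun l => l ++ [i])) d)
      PySem.Dict.empty
  occ.items.foldl
    (fun ans tl =>
      let L : Int := tl.1.length
      let isX := tl.2.foldl (fun m p => pvMark m p L) (cs.map (fun c => c == 'x'))
      if pvCountRuns isX == K then ans + 1 else ans)
    0

-- ===== PRECONDITION & SPEC =====
def Spec_stringovi (S : String) (K : Int) (out : Int) : Prop := out = stringovi_alt S K
instance (S : String) (K : Int) (out : Int) : Decidable (Spec_stringovi S K out) := by unfold Spec_stringovi; infer_instance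

-- ===== CLAIM (what is proved, stated in full; the proofs are below) =====
def Claim_equal_stringovi : Prop := ∀ (S : String) (K : Int), Dom_stringovi S K → Spec_stringovi S K (stringovi S K)

-- ===== LEMMAS AND PROOFS =====

-- the flattened (i, j) pair list both nested loops traverse
def pvPairs (n : Int) : List (Int × Int) :=
  (PySem.List.pyRange 0 n 1).flatMap (fun i => (PySem.List.pyRange i n 1).map (fun j => (i, j)))

-- the substring S[i:j+1] named by a pair
def pvSub (cs : List Char) (p : Int × Int) : List Char :=
  PySem.List.slice cs (some p.1) (some (p.2 + 1))

theorem mem_pvPairs {n : Int} {p : Int × Int} :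
    p ∈ pvPairs n ↔ 0 ≤ p.1 ∧ p.1 ≤ p.2 ∧ p.2 < n := by
  obtain ⟨i, j⟩ := p
  simp [pvPairs, List.mem_flatMap, PySem.List.mem_pyRange_one]
  omega

-- ---- A reduced to a countP over the distinct-substring list ----
theorem substrings_shape (cs : List Char) :
    ((PySem.List.pyRange 0 (cs.length : Int) 1).foldl
      (fun st i =>
        (PySem.List.pyRange i (cs.length : Int) 1).foldl
          (fun st j => PySem.Set.add st (PySem.List.slice cs (some i) (some (j + 1)))) st)
      PySem.Set.empty)
    = PySem.Set.ofList ((pvPairs (cs.length : Int)).map (pvSub cs)) := by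
  rw [PySem.Set.ofList_eq_foldl, List.foldl_map, pvPairs, List.foldl_flatMap]
  simp only [List.foldl_map]
  rfl

theorem stringovi_eq_countP (S : String) (K : Int) :
    stringovi S K =
      ((PySem.Set.ofList ((pvPairs (S.toList.length : Int)).map (pvSub S.toList))).countP
        (fun t => pvCountIslands
          (pvCreateIslands S.toList t (List.replicate t.length 'x')) == K) : Int) := by
  simp only [stringovi]
  rw [substrings_shape, PySem.Dict.getD_counter, List.count_eq_countP, List.countP_map]
  rfl

-- ---- B reduced to a countP over the same list ----
theorem occ_shape (cs : List Char) :
    ((PySem.List.pyRange 0 (cs.length : Int) 1).foldl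
      (fun d i =>
        (PySem.List.pyRange i (cs.length : Int) 1).foldl
          (fun d j => d.modify (PySem.List.slice cs (some i) (some (j + 1))) [] (fun l => l ++ [i])) d)
      PySem.Dict.empty)
    = ((pvPairs (cs.length : Int)).map (fun p => (pvSub cs p, p.1))).foldl
        (fun d q => d.modify q.1 [] (fun l => l ++ [q.2])) PySem.Dict.empty := by
  rw [List.foldl_map, pvPairs, List.foldl_flatMap]
  simp only [List.foldl_map]
  rfl

theorem occ_keys (cs : List Char) :
    (((pvPairs (cs.length : Int)).map (fun p => (pvSub cs p, p.1))).foldl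
        (fun d q => d.modify q.1 [] (fun l => l ++ [q.2])) PySem.Dict.empty).keys
      = PySem.Set.ofList ((pvPairs (cs.length : Int)).map (pvSub cs)) := by
  rw [List.foldl_map]
  rw [PySem.Dict.keys_foldl_modify_key (key := fun p : Int × Int => pvSub cs p)
    (f := fun _ p => (fun l => l ++ [p.1]))]
  rw [PySem.Set.ofList_eq_foldl]
  rfl

theorem occ_keys_nodup (cs : List Char) :
    (((pvPairs (cs.length : Int)).map (fun p => (pvSub cs p, p.1))).foldl
        (fun d q => d.modify q.1 [] (fun l => l ++ [q.2])) PySem.Dict.empty).keys.Nodup := by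
  rw [List.foldl_map]
  exact PySem.Dict.nodup_keys_foldl_modify_key _ (fun p : Int × Int => pvSub cs p) []
    (fun _ p => (fun l => l ++ [p.1])) PySem.Dict.empty List.nodup_nil

theorem occ_getD (cs : List Char) (t : List Char) :
    (((pvPairs (cs.length : Int)).map (fun p => (pvSub cs p, p.1))).foldl
        (fun d q => d.modify q.1 [] (fun l => l ++ [q.2])) PySem.Dict.empty).getD t []
      = ((pvPairs (cs.length : Int)).filter (fun p => pvSub cs p == t)).map (·.1) := by
  rw [PySem.Dict.getD_foldl_modify_append, List.filter_map, List.map_map]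
  rfl

theorem alt_eq_countP (S : String) (K : Int) :
    stringovi_alt S K =
      ((PySem.Set.ofList ((pvPairs (S.toList.length : Int)).map (pvSub S.toList))).countP
        (fun t => pvCountRuns
          ((((pvPairs (S.toList.length : Int)).filter (fun p => pvSub S.toList p == t)).map (·.1)).foldl
            (fun m p => pvMark m p (t.length : Int)) (S.toList.map (· == 'x'))) == K) : Int) := by
  simp only [stringovi_alt]
  rw [occ_shape, PySem.Dict.items_eq_map_keys _ (occ_keys_nodup S.toList) [], List.foldl_map,
    PySem.List.foldl_count_if, occ_keys, zero_add]
  refine congrArg _ (List.countP_congr fun t _ => ?_)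
  simp only [occ_getD]

-- ---- run counting: A's descent+last count equals B's leading-edge count ----
def pvDescB : Bool → List Bool → Int
  | _, [] => 0
  | p, x :: xs => (if p && !x then 1 else 0) + pvDescB x xs

def pvLeadB : Bool → List Bool → Int
  | _, [] => 0
  | p, x :: xs => (if x && !p then 1 else 0) + pvLeadB x xs

def pvLastB : Bool → List Bool → Bool
  | p, [] => p
  | _, x :: xs => pvLastB x xs

theorem pvCountRuns_eq_leadB (m : List Bool) : pvCountRuns m = pvLeadB false m := by
  have aux : ∀ (m : List Bool) (c : Int) (p : Bool),
      (m.foldl (fun (st : Int × Bool) b => (if b && !st.2 then st.1 + 1 else st.1, b)) (c, p)).1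
        = c + pvLeadB p m := by
    intro m
    induction m with
    | nil => intro c p; simp [pvLeadB]
    | cons x xs ih =>
      intro c p
      simp only [List.foldl_cons, pvLeadB, ih]
      split <;> ring
  simpa [pvCountRuns] using aux m 0 false

theorem desc_last_eq_lead (l : List Bool) (p : Bool) :
    pvDescB p l + (if pvLastB p l then 1 else 0) = pvLeadB p l + (if p then 1 else 0) := by
  induction l generalizing p with
  | nil => simp [pvDescB, pvLastB, pvLeadB]
  | cons x xs ih =>
    have h := ih x
    simp only [pvDescB, pvLastB, pvLeadB]
    by_cases hl : pvLastB x xs = true <;> cases p <;> cases x <;> simp_all <;> linarith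

theorem pyRange_one_map (n : Nat) :
    PySem.List.pyRange 1 (n : Int) 1 = List.map (fun k : Nat => (k : Int) + 1) (List.range (n - 1)) := by
  rw [PySem.List.pyRange_of_pos 1 (n : Int) (by norm_num)]
  split_ifs with h
  · have : (((n : Int) - 1 + 1 - 1) / 1).toNat = n - 1 := by omega
    rw [this]
    exact List.map_congr_left (fun k _ => by ring)
  · have : n - 1 = 0 := by omega
    simp [this]

theorem zip_shape (s : List Char) :
    (PySem.List.pyRange 1 (s.length : Int) 1).map
        (fun i => (PySem.List.pyGetD s (i - 1) ' ', PySem.List.pyGetD s i ' '))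
      = s.zip s.tail := by
  rw [pyRange_one_map, List.map_map]
  apply List.ext_getElem
  · simp [List.length_zip]
  · intro k h1 h2
    simp only [List.getElem_map, List.getElem_range, Function.comp]
    have hk : k < s.length - 1 := by simpa using h1
    have e1 : (k : Int) + 1 - 1 = ((k : Nat) : Int) := by ring
    have e2 : (k : Int) + 1 = (((k + 1 : Nat)) : Int) := by push_cast; ring_nf
    rw [e1, e2, PySem.List.pyGetD_natCast, PySem.List.pyGetD_natCast]
    simp [List.getElem_zip, List.getD_eq_getElem?_getD,
      (by omega : k < s.length), (by omega : k + 1 < s.length), List.getElem_tail]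

theorem countW (xs : List Char) (x : Char) :
    ((List.countP (fun pr : Char × Char => pr.1 == 'x' && !(pr.2 == 'x')) ((x :: xs).zip xs) : Nat) : Int)
      = pvDescB (x == 'x') (xs.map (· == 'x')) := by
  induction xs generalizing x with
  | nil => simp [pvDescB]
  | cons y ys ih =>
    rw [List.zip_cons_cons, List.countP_cons]
    push_cast
    rw [ih y]
    simp only [List.map_cons, pvDescB]
    cases (x == 'x') <;> cases (y == 'x') <;> simp only [Bool.not_true, Bool.not_false, Bool.and_true, Bool.and_false, if_true] <;> ring

theorem lastHead (x : Char) (xs : List Char) :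
    PySem.List.pyGetD (x :: xs) (-1) ' ' = (x :: xs)[xs.length] := by
  simp only [PySem.List.pyGetD, PySem.List.pyGet?, PySem.List.pyIdx?]
  norm_num

theorem lastL (xs : List Char) (x : Char) :
    (PySem.List.pyGetD (x :: xs) (-1) ' ' == 'x') = pvLastB (x == 'x') (xs.map (· == 'x')) := by
  induction xs generalizing x with
  | nil => rw [lastHead]; simp [pvLastB]
  | cons y ys ih =>
    rw [lastHead]
    simp only [List.length_cons, List.getElem_cons_succ, List.map_cons, pvLastB]
    rw [← ih y, lastHead]; rfl

theorem countIslands_eq_countRuns (s : List Char) :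
    pvCountIslands s = pvCountRuns (s.map (· == 'x')) := by
  cases s with
  | nil => decide
  | cons x xs =>
    have hc : ((PySem.List.pyRange 1 (((x :: xs).length : Nat) : Int) 1).foldl
        (fun c i => if PySem.List.pyGetD (x :: xs) (i - 1) ' ' == 'x'
            && !(PySem.List.pyGetD (x :: xs) i ' ' == 'x') then c + 1 else c) (0 : Int))
        = pvDescB (x == 'x') (xs.map (· == 'x')) := by
      rw [PySem.List.foldl_count_if]
      rw [show (fun i : Int => (PySem.List.pyGetD (x :: xs) (i - 1) ' ' == 'x'
            && !(PySem.List.pyGetD (x :: xs) i ' ' == 'x')))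
          = (fun pr : Char × Char => pr.1 == 'x' && !(pr.2 == 'x'))
            ∘ (fun i => (PySem.List.pyGetD (x :: xs) (i - 1) ' ', PySem.List.pyGetD (x :: xs) i ' '))
          from rfl]
      rw [← List.countP_map, zip_shape, List.tail_cons, countW]
      ring
    simp only [pvCountIslands, hc, lastL, pvCountRuns_eq_leadB, List.map_cons, pvLeadB]
    have h := desc_last_eq_lead (xs.map (· == 'x')) (x == 'x')
    by_cases hl : pvLastB (x == 'x') (xs.map (· == 'x')) = true <;>
      cases hx : (x == 'x') <;> simp_all <;> linarith

-- ---- pointwise characterisations ----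
theorem splice_length (m : List Char) (p : Int) (rep : List Char)
    (hL : p.toNat + rep.length ≤ m.length) :
    (pvSplice m p rep).length = m.length := by
  simp [pvSplice]
  omega

theorem splice_getD (m : List Char) (p : Int) (L : Nat)
    (hL : p.toNat + L ≤ m.length) (q : Nat) :
    (pvSplice m p (List.replicate L 'x')).getD q ' '
      = if p.toNat ≤ q ∧ q < p.toNat + L then 'x' else m.getD q ' ' := by
  set a := p.toNat with ha
  simp only [pvSplice, List.getD_eq_getElem?_getD, List.getElem?_append, List.length_append,
    List.length_take, List.length_replicate, List.getElem?_take, List.getElem?_drop,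
    List.getElem?_replicate]
  have hmin : min a m.length = a := by omega
  rw [hmin]
  split_ifs <;> simp_all <;> omega

theorem splice_fold_length (cond : Int → Bool) (L : Nat) (ps : List Int) (m : List Char)
    (hps : ∀ p ∈ ps, 0 ≤ p ∧ p.toNat + L ≤ m.length) :
    ((ps.foldl (fun m' p => if cond p then pvSplice m' p (List.replicate L 'x') else m') m).length
      = m.length) := by
  induction ps generalizing m with
  | nil => rfl
  | cons p ps ih =>
    simp only [List.foldl_cons]
    have hp := hps p (by simp)
    have hlen : (if cond p then pvSplice m p (List.replicate L 'x') else m).length = m.length := by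
      split
      · exact splice_length m p _ (by simpa using hp.2)
      · rfl
    rw [ih _ (fun r hr => by rw [hlen]; exact hps r (by simp [hr])), hlen]

theorem splice_fold_getD (cond : Int → Bool) (L : Nat) (ps : List Int) (m : List Char)
    (hps : ∀ p ∈ ps, 0 ≤ p ∧ p.toNat + L ≤ m.length) (q : Nat) :
    (ps.foldl (fun m' p => if cond p then pvSplice m' p (List.replicate L 'x') else m') m).getD q ' '
      = if (∃ p ∈ ps, cond p ∧ p.toNat ≤ q ∧ q < p.toNat + L) then 'x' else m.getD q ' ' := by
  induction ps generalizing m with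
  | nil => simp
  | cons p ps ih =>
    simp only [List.foldl_cons]
    have hp := hps p (by simp)
    have hlen : (if cond p then pvSplice m p (List.replicate L 'x') else m).length = m.length := by
      split
      · exact splice_length m p _ (by simpa using hp.2)
      · rfl
    rw [ih _ (fun r hr => by rw [hlen]; exact hps r (by simp [hr]))]
    have h1 : (if cond p then pvSplice m p (List.replicate L 'x') else m).getD q ' '
        = if cond p ∧ p.toNat ≤ q ∧ q < p.toNat + L then 'x' else m.getD q ' ' := by
      by_cases hc : cond p
      · rw [if_pos hc, splice_getD m p L hp.2 q]
        simp [hc]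
      · simp [hc]
    rw [h1]
    by_cases hc : cond p = true ∧ p.toNat ≤ q ∧ q < p.toNat + L
    · rw [if_pos (⟨p, List.mem_cons_self, hc⟩ :
        ∃ r ∈ p :: ps, cond r = true ∧ r.toNat ≤ q ∧ q < r.toNat + L)]
      split <;> rfl
    · by_cases he : ∃ r ∈ ps, cond r = true ∧ r.toNat ≤ q ∧ q < r.toNat + L
      · rw [if_pos he]
        obtain ⟨r, hr, h3⟩ := he
        rw [if_pos (⟨r, List.mem_cons_of_mem _ hr, h3⟩ :
          ∃ r ∈ p :: ps, cond r = true ∧ r.toNat ≤ q ∧ q < r.toNat + L)]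
      · rw [if_neg he, if_neg hc, if_neg]
        rintro ⟨r, hr, h3⟩
        rcases List.mem_cons.mp hr with rfl | hr'
        · exact hc h3
        · exact he ⟨r, hr', h3⟩

theorem setfold_length (qs : List Int) (m : List Bool) :
    (qs.foldl (fun m q => PySem.List.pySetD m q true) m).length = m.length := by
  induction qs generalizing m with
  | nil => rfl
  | cons q qs ih => rw [List.foldl_cons, ih, PySem.List.length_pySetD]

theorem mark_length (m : List Bool) (p L : Int) : (pvMark m p L).length = m.length := by
  exact setfold_length _ m

theorem pyRange_empty (a b : Int) (h : b ≤ a) : PySem.List.pyRange a b 1 = [] := by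
  rw [PySem.List.pyRange_of_pos a b (by norm_num)]
  rw [if_neg (by omega)]
  rfl

theorem setfold_range_getD (k : Nat) : ∀ (m : List Bool) (a b : Int), (b - a).toNat = k →
    0 ≤ a → b ≤ (m.length : Int) → ∀ (q : Nat),
    ((PySem.List.pyRange a b 1).foldl (fun m q => PySem.List.pySetD m q true) m).getD q false
      = if a ≤ (q : Int) ∧ (q : Int) < b then true else m.getD q false := by
  induction k with
  | zero =>
    intro m a b hk ha hb q
    rw [pyRange_empty a b (by omega)]
    rw [if_neg (by omega)]
    rfl
  | succ k ih =>
    intro m a b hk ha hb q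
    obtain ⟨a', rfl⟩ : ∃ a' : Nat, a = (a' : Int) := ⟨a.toNat, by omega⟩
    rw [PySem.List.pyRange_one_cons (by omega : (a' : Int) < b), List.foldl_cons,
      PySem.List.pySetD_natCast]
    have hb' : b ≤ ((m.set a' true).length : Int) := by simp; omega
    have hlen : ((a' : Int) + 1) = (((a' + 1 : Nat)) : Int) := by push_cast; ring
    rw [hlen, ih _ _ b (by omega) (by omega) hb' q]
    by_cases h1 : (((a' + 1 : Nat)) : Int) ≤ (q : Int) ∧ (q : Int) < b
    · rw [if_pos h1, if_pos (by push_cast at h1 ⊢; omega)]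
    · rw [if_neg h1]
      by_cases h2 : ((a' : Int)) ≤ (q : Int) ∧ (q : Int) < b
      · rw [if_pos h2]
        have hq : q = a' := by push_cast at h1 h2; omega
        subst hq
        have hql : q < m.length := by omega
        simp [List.getD_eq_getElem?_getD, hql]
      · rw [if_neg h2]
        have hne : a' ≠ q := by push_cast at h1 h2; omega
        simp [List.getD_eq_getElem?_getD, List.getElem?_set_ne hne]

-- ---- the per-substring agreement ----
theorem mark_getD (m : List Bool) (p L : Int) (hp : 0 ≤ p) (hL : p + L ≤ (m.length : Int)) (q : Nat) :
    (pvMark m p L).getD q false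
      = if p ≤ (q : Int) ∧ (q : Int) < p + L then true else m.getD q false := by
  by_cases hLp : 0 ≤ L
  · exact setfold_range_getD (p + L - p).toNat m p (p + L) rfl hp hL q
  · unfold pvMark
    rw [pyRange_empty _ _ (by omega), if_neg (by omega)]
    rfl

theorem mark_fold_length (L : Int) (ps : List Int) (m : List Bool) :
    ((ps.foldl (fun m' p => pvMark m' p L) m).length = m.length) := by
  induction ps generalizing m with
  | nil => rfl
  | cons p ps ih => rw [List.foldl_cons, ih, mark_length]

theorem mark_fold_getD (L : Int) (ps : List Int) (m : List Bool)
    (hps : ∀ p ∈ ps, 0 ≤ p ∧ p + L ≤ (m.length : Int)) (q : Nat) :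
    (ps.foldl (fun m' p => pvMark m' p L) m).getD q false
      = if (∃ p ∈ ps, p ≤ (q : Int) ∧ (q : Int) < p + L) then true else m.getD q false := by
  induction ps generalizing m with
  | nil => simp
  | cons p ps ih =>
    rw [List.foldl_cons]
    have hp := hps p (by simp)
    rw [ih _ (fun r hr => by rw [mark_length]; exact hps r (by simp [hr]))]
    rw [mark_getD m p L hp.1 hp.2 q]
    by_cases hc : p ≤ (q : Int) ∧ (q : Int) < p + L
    · rw [if_pos (⟨p, List.mem_cons_self, hc⟩ :
        ∃ r ∈ p :: ps, r ≤ (q : Int) ∧ (q : Int) < r + L)]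
      split <;> rfl
    · by_cases he : ∃ r ∈ ps, r ≤ (q : Int) ∧ (q : Int) < r + L
      · rw [if_pos he]
        obtain ⟨r, hr, h3⟩ := he
        rw [if_pos (⟨r, List.mem_cons_of_mem _ hr, h3⟩ :
          ∃ r ∈ p :: ps, r ≤ (q : Int) ∧ (q : Int) < r + L)]
      · rw [if_neg he, if_neg hc, if_neg]
        rintro ⟨r, hr, h3⟩
        rcases List.mem_cons.mp hr with rfl | hr'
        · exact hc h3
        · exact he ⟨r, hr', h3⟩

theorem slice_pair (cs : List Char) (i j : Int) (h0 : 0 ≤ i) (hij : i ≤ j) :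
    PySem.List.slice cs (some i) (some (j + 1)) = (cs.drop i.toNat).take (j.toNat + 1 - i.toNat) := by
  have e1 : i = ((i.toNat : Nat) : Int) := by omega
  have e2 : j + 1 = (((j.toNat + 1 : Nat)) : Int) := by omega
  rw [e1, e2, PySem.List.slice_natCast]
  simp only [Int.toNat_natCast]

theorem slice_pair_len (cs : List Char) (i j : Int) (h0 : 0 ≤ i) (hij : i ≤ j)
    (hj : j < (cs.length : Int)) :
    (PySem.List.slice cs (some i) (some (j + 1))).length = j.toNat + 1 - i.toNat := by
  rw [slice_pair cs i j h0 hij]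
  simp [List.length_take, List.length_drop]
  omega

theorem per_substring (cs : List Char) (t : List Char)
    (ht : t ∈ (pvPairs (cs.length : Int)).map (pvSub cs)) (K : Int) :
    (pvCountIslands (pvCreateIslands cs t (List.replicate t.length 'x')) == K)
      = (pvCountRuns
          ((((pvPairs (cs.length : Int)).filter (fun p => pvSub cs p == t)).map (·.1)).foldl
            (fun m p => pvMark m p (t.length : Int)) (cs.map (· == 'x'))) == K) := by
  obtain ⟨r, hr, rfl⟩ := List.mem_map.mp ht
  obtain ⟨h1, h2, h3⟩ := mem_pvPairs.mp hr
  have hlen : (pvSub cs r).length = r.2.toNat + 1 - r.1.toNat := slice_pair_len cs r.1 r.2 h1 h2 h3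
  set L := (pvSub cs r).length with hLdef
  have hL1 : 0 < L := by omega
  have hLle : L ≤ cs.length := by omega
  -- the two boolean coverage lists are equal
  suffices h : (pvCreateIslands cs (pvSub cs r) (List.replicate L 'x')).map (· == 'x')
      = (((pvPairs (cs.length : Int)).filter (fun p => pvSub cs p == pvSub cs r)).map (·.1)).foldl
          (fun m p => pvMark m p (L : Int)) (cs.map (· == 'x')) by
    rw [countIslands_eq_countRuns, h]
  have hcreate : pvCreateIslands cs (pvSub cs r) (List.replicate L 'x')
      = (PySem.List.pyRange 0 ((cs.length : Int) - (L : Int) + 1) 1).foldl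
          (fun m' p => if (PySem.List.slice cs (some p) (some (p + (L : Int))) == pvSub cs r)
            then pvSplice m' p (List.replicate L 'x') else m') cs := rfl
  have hps : ∀ p ∈ PySem.List.pyRange 0 ((cs.length : Int) - (L : Int) + 1) 1,
      0 ≤ p ∧ p.toNat + L ≤ cs.length := by
    intro p hp
    rw [PySem.List.mem_pyRange_one] at hp
    exact ⟨hp.1, by omega⟩
  have hstarts : ∀ p ∈ (((pvPairs (cs.length : Int)).filter
        (fun p => pvSub cs p == pvSub cs r)).map (·.1)),
      0 ≤ p ∧ p + (L : Int) ≤ (((cs.map (· == 'x')).length : Nat) : Int) := by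
    intro p hp
    obtain ⟨r', hr', rfl⟩ := List.mem_map.mp hp
    have hf := List.mem_filter.mp hr'
    obtain ⟨g1, g2, g3⟩ := mem_pvPairs.mp hf.1
    have heq : pvSub cs r' = pvSub cs r := by simpa using hf.2
    have hlen' : (pvSub cs r').length = r'.2.toNat + 1 - r'.1.toNat :=
      slice_pair_len cs r'.1 r'.2 g1 g2 g3
    rw [heq, ← hLdef] at hlen'
    rw [List.length_map]
    exact ⟨g1, by omega⟩
  have hcov : ∀ q : Nat,
      (∃ p ∈ PySem.List.pyRange 0 ((cs.length : Int) - (L : Int) + 1) 1,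
        (PySem.List.slice cs (some p) (some (p + (L : Int))) == pvSub cs r) = true
          ∧ p.toNat ≤ q ∧ q < p.toNat + L)
      ↔ (∃ p ∈ (((pvPairs (cs.length : Int)).filter
            (fun p => pvSub cs p == pvSub cs r)).map (·.1)),
          p ≤ (q : Int) ∧ (q : Int) < p + (L : Int)) := by
    intro q
    constructor
    · rintro ⟨p, hpmem, hcond, hq1, hq2⟩
      rw [PySem.List.mem_pyRange_one] at hpmem
      refine ⟨p, ?_, by omega, by omega⟩
      apply List.mem_map.mpr
      refine ⟨(p, p + (L : Int) - 1), List.mem_filter.mpr ⟨?_, ?_⟩, rfl⟩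
      · exact mem_pvPairs.mpr ⟨by omega, by omega, by omega⟩
      · show (pvSub cs (p, p + (L : Int) - 1) == pvSub cs r) = true
        have e : (p + (L : Int) - 1) + 1 = p + (L : Int) := by ring
        simp only [pvSub, e]
        exact hcond
    · rintro ⟨p, hpmem, hq1, hq2⟩
      obtain ⟨r', hr', rfl⟩ := List.mem_map.mp hpmem
      have hf := List.mem_filter.mp hr'
      obtain ⟨g1, g2, g3⟩ := mem_pvPairs.mp hf.1
      have heq : pvSub cs r' = pvSub cs r := by simpa using hf.2
      have hlen' : (pvSub cs r').length = r'.2.toNat + 1 - r'.1.toNat :=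
        slice_pair_len cs r'.1 r'.2 g1 g2 g3
      rw [heq, ← hLdef] at hlen'
      refine ⟨r'.1, PySem.List.mem_pyRange_one.mpr ⟨g1, by omega⟩, ?_, by omega, by omega⟩
      have e : r'.1 + (L : Int) = r'.2 + 1 := by omega
      rw [e]
      exact hf.2
  apply List.ext_getElem
  · rw [List.length_map, hcreate,
      splice_fold_length _ L _ cs hps, mark_fold_length, List.length_map]
  · intro q hq1 hq2
    have hqcs : q < cs.length := by
      rw [List.length_map, hcreate, splice_fold_length _ L _ cs hps] at hq1
      exact hq1
    rw [List.getElem_map]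
    rw [← List.getD_eq_getElem _ ' ' (by rw [hcreate, splice_fold_length _ L _ cs hps]; exact hqcs)]
    rw [← List.getD_eq_getElem _ false hq2]
    rw [hcreate, splice_fold_getD _ L _ cs hps q, mark_fold_getD _ _ _ hstarts q]
    have hbase : (cs.map (· == 'x')).getD q false = (cs.getD q ' ' == 'x') := by
      rw [List.getD_eq_getElem _ false (by rw [List.length_map]; exact hqcs),
        List.getElem_map, List.getD_eq_getElem _ ' ' hqcs]
    by_cases hcA : ∃ p ∈ PySem.List.pyRange 0 ((cs.length : Int) - (L : Int) + 1) 1,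
        (PySem.List.slice cs (some p) (some (p + (L : Int))) == pvSub cs r) = true
          ∧ p.toNat ≤ q ∧ q < p.toNat + L
    · rw [if_pos hcA, if_pos ((hcov q).mp hcA)]
      rfl
    · rw [if_neg hcA, if_neg (fun hc => hcA ((hcov q).mpr hc)), hbase]

-- ===== VERDICT (by name: the statement is the Claim_ definition above) =====
theorem stringovi_spec : Claim_equal_stringovi := by
  intro S K _
  unfold Spec_stringovi
  rw [stringovi_eq_countP, alt_eq_countP]
  have h := List.countP_congr (l := PySem.Set.ofList ((pvPairs (S.toList.length : Int)).map (pvSub S.toList)))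
    (p := fun t => pvCountIslands (pvCreateIslands S.toList t (List.replicate t.length 'x')) == K)
    (q := fun t => pvCountRuns
          ((((pvPairs (S.toList.length : Int)).filter (fun p => pvSub S.toList p == t)).map (·.1)).foldl
            (fun m p => pvMark m p (t.length : Int)) (S.toList.map (· == 'x'))) == K)
    (fun t htm => iff_of_eq (congrArg (· = true)
      (per_substring S.toList t ((PySem.Set.mem_ofList _ _).mp htm) K)))
  rw [h]
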